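-- pv_equiv track=rewrite | github.com/GUILHOT/AI-powered-customer-service-system | chatbot.py | find_category_and_product_only
-- ===== SOURCE A (Python) =====
-- def find_category_and_product_only(user_input, products_dict):
--     user_input = user_input.lower()
--     matched_products = []
--     for key, info in products_dict.items():
--         if (key in user_input or
--             any(word in user_input for word in key.split()) or
--             any(word in user_input for word in info["name"].lower().split())):
--             matched_products.append(info)
--     seen = set()
--     unique = []
--     for p in matched_products:
--         if p["name"] not in seen:
--             seen.add(p["name"])
--             unique.append(p)
--     return unique
-- ===== SOURCE B (Python) =====
-- def find_category_and_product_only(user_input, products_dict):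
--     user_input = user_input.lower()
--     items = list(products_dict.items())
--
--     def matches(key, info):
--         return (key in user_input or
--                 any(word in user_input for word in key.split()) or
--                 any(word in user_input for word in info["name"].lower().split()))
--
--     return [info for i, (key, info) in enumerate(items)
--             if matches(key, info)
--             and not any(matches(k2, inf2) and inf2["name"] == info["name"]
--                         for k2, inf2 in items[:i])]
-- ===== Notes on version B (the rewrite author's own statement) =====
-- stated objective: alternative
-- what changed: A builds an intermediate matched list and then deduplicates it with a mutable seen-set fold; B is a declarative position-wise filter with no auxiliary set and no intermediate list: a product is emitted iff it matches and no earlier product both matches and shares its name, decided by re-scanning the prefix items[:i].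
import Mathlib
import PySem

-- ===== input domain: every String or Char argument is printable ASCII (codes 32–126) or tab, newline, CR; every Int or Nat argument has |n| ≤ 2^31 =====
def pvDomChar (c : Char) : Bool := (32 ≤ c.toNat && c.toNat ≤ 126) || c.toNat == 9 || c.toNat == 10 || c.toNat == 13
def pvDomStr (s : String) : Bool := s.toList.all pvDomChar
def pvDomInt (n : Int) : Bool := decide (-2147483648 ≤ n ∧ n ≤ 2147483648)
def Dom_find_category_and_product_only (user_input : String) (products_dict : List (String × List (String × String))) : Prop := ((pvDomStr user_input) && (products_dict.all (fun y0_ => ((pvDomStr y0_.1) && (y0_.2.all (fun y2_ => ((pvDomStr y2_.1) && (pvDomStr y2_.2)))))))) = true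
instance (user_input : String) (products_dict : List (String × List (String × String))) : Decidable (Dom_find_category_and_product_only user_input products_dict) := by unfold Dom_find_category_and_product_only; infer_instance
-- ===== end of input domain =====

-- B replaces A's seen-set dedup fold (with an intermediate matched list) by a declarative position-wise
-- filter: keep a product iff it matches and no earlier product both matches and shares its name (alternative decomposition, no auxiliary set).


-- ===== PORT A =====
-- info["name"] is ported as getD "name" ""; Pre_ requires the "name" key (Python raises KeyError without it).
def find_category_and_product_only (user_input : String) (products_dict : List (String × List (String × String))) : List (List (String × String)) :=
  let ui := PySem.Str.lower user_input
  let matched_products : List (List (String × String)) :=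
    products_dict.foldl (fun acc kv =>
      if PySem.Str.isIn kv.1 ui
          || (PySem.Str.split₀ kv.1).any (fun word => PySem.Str.isIn word ui)
          || (PySem.Str.split₀ (PySem.Str.lower ((PySem.Dict.mk kv.2).getD "name" ""))).any
               (fun word => PySem.Str.isIn word ui)
      then acc ++ [kv.2] else acc) []
  let fin := matched_products.foldl
    (fun (st : PySem.Set String × List (List (String × String))) p =>
      if PySem.Set.contains st.1 ((PySem.Dict.mk p).getD "name" "") then st
      else (PySem.Set.add st.1 ((PySem.Dict.mk p).getD "name" ""), st.2 ++ [p]))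
    (PySem.Set.empty, [])
  fin.2

-- ===== PORT B =====
-- port of Source B's local helper `matches` (closure over the lowered user input)
def pvMatches (ui : String) (key : String) (info : List (String × String)) : Bool :=
  PySem.Str.isIn key ui
    || (PySem.Str.split₀ key).any (fun word => PySem.Str.isIn word ui)
    || (PySem.Str.split₀ (PySem.Str.lower ((PySem.Dict.mk info).getD "name" ""))).any
         (fun word => PySem.Str.isIn word ui)

-- hand port of Python's enumerate(items) (exact: indices 0,1,2,… paired with the elements)
def pvEnumFrom {α : Type} (k : Nat) : List α → List (Nat × α)
  | [] => []
  | a :: t => (k, a) :: pvEnumFrom (k + 1) t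

-- items[:i] with i ≥ 0 (an enumerate index) is List.take i — exact here
def find_category_and_product_only_alt (user_input : String) (products_dict : List (String × List (String × String))) : List (List (String × String)) :=
  let ui := PySem.Str.lower user_input
  let items := products_dict
  ((pvEnumFrom 0 items).filter (fun ikv =>
      pvMatches ui ikv.2.1 ikv.2.2
        && !((items.take ikv.1).any (fun kv2 =>
              pvMatches ui kv2.1 kv2.2
                && ((PySem.Dict.mk kv2.2).getD "name" "" == (PySem.Dict.mk ikv.2.2).getD "name" ""))))).map
    (fun ikv => ikv.2.2)

-- ===== PRECONDITION & SPEC =====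
-- Pre_ excludes (a) inputs where Python raises KeyError: some product info lacks the "name" key, and
-- (b) association lists with duplicate keys (outer dict or an inner info dict), which denote no Python dict value.
def Pre_find_category_and_product_only (user_input : String) (products_dict : List (String × List (String × String))) : Prop :=
  (products_dict.map Prod.fst).Nodup ∧
  ∀ p ∈ products_dict, (p.2.map Prod.fst).Nodup ∧ (PySem.Dict.mk p.2).contains "name" = true
instance (user_input : String) (products_dict : List (String × List (String × String))) : Decidable (Pre_find_category_and_product_only user_input products_dict) := by unfold Pre_find_category_and_product_only; infer_instance
def pvWitness_find_category_and_product_only : String × (List (String × List (String × String))) :=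
  ("cheap laptop please", [("laptop", [("name", "Laptop Pro"), ("price", "999")]), ("phone", [("name", "Phone X")])])

def Spec_find_category_and_product_only (user_input : String) (products_dict : List (String × List (String × String))) (out : List (List (String × String))) : Prop := out = find_category_and_product_only_alt user_input products_dict
instance (user_input : String) (products_dict : List (String × List (String × String))) (out : List (List (String × String))) : Decidable (Spec_find_category_and_product_only user_input products_dict out) := by unfold Spec_find_category_and_product_only; infer_instance

-- ===== CLAIM (what is proved, stated in full; the proofs are below) =====
def Claim_equal_find_category_and_product_only : Prop := ∀ (user_input : String) (products_dict : List (String × List (String × String))), Dom_find_category_and_product_only user_input products_dict → Pre_find_category_and_product_only user_input products_dict → Spec_find_category_and_product_only user_input products_dict (find_category_and_product_only user_input products_dict)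

-- ===== LEMMAS AND PROOFS =====

-- A's first pass (append-if fold) builds the filtered projections.
theorem pv_foldl_if_append {α β : Type} (m : α → Bool) (f : α → β) :
    ∀ (l : List α) (acc : List β),
      l.foldl (fun acc x => if m x then acc ++ [f x] else acc) acc
        = acc ++ (l.filter m).map f := by
  intro l
  induction l with
  | nil => simp
  | cons x t ih =>
    intro acc
    by_cases h : m x <;> simp [h, ih]

-- recursive form of A's dedup fold
def pvDedupRec {β γ : Type} [BEq γ] (g : β → γ) : List β → PySem.Set γ → List β
  | [], _ => []
  | p :: t, S =>
    if PySem.Set.contains S (g p) then pvDedupRec g t S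
    else p :: pvDedupRec g t (PySem.Set.add S (g p))

theorem pv_dedup_fold {β γ : Type} [BEq γ] (g : β → γ) :
    ∀ (ys : List β) (S : PySem.Set γ) (acc : List β),
      (ys.foldl (fun st p =>
          if PySem.Set.contains st.1 (g p) then st
          else (PySem.Set.add st.1 (g p), st.2 ++ [p])) (S, acc)).2
        = acc ++ pvDedupRec g ys S := by
  intro ys
  induction ys with
  | nil => simp [pvDedupRec]
  | cons p t ih =>
    intro S acc
    rw [List.foldl_cons]
    cases h : PySem.Set.contains S (g p)
    · rw [if_neg Bool.false_ne_true, ih]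
      simp only [pvDedupRec, h, Bool.false_eq_true, if_false]
      simp [List.append_assoc]
    · rw [if_pos rfl, ih]
      simp only [pvDedupRec, h, if_true]

-- the common specification both programs compute
def pvSpec {α β γ : Type} [BEq γ] (m : α → Bool) (h : α → β) (g : β → γ) :
    List α → PySem.Set γ → List β
  | [], _ => []
  | x :: t, S =>
    if m x then
      (if PySem.Set.contains S (g (h x)) then pvSpec m h g t S
       else h x :: pvSpec m h g t (PySem.Set.add S (g (h x))))
    else pvSpec m h g t S

theorem pv_dedupRec_filter_map {α β γ : Type} [BEq γ] (m : α → Bool) (h : α → β) (g : β → γ) :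
    ∀ (xs : List α) (S : PySem.Set γ),
      pvDedupRec g ((xs.filter m).map h) S = pvSpec m h g xs S := by
  intro xs
  induction xs with
  | nil => intro S; rfl
  | cons x t ih =>
    intro S
    cases hm : m x
    · simp only [List.filter_cons, hm, Bool.false_eq_true, if_false, pvSpec, ih]
    · simp only [List.filter_cons, hm, if_true, List.map_cons, pvSpec]
      cases hc : PySem.Set.contains S (g (h x)) <;>
        simp only [pvDedupRec, hc, Bool.false_eq_true, if_false, if_true, ih]

theorem pv_contains_add {γ : Type} [BEq γ] [LawfulBEq γ] (S : PySem.Set γ) (v s : γ) :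
    PySem.Set.contains (PySem.Set.add S v) s = (PySem.Set.contains S s || v == s) := by
  rw [Bool.eq_iff_iff]
  simp only [Bool.or_eq_true, PySem.Set.contains_iff, PySem.Set.mem_add, beq_iff_eq]
  constructor
  · rintro (hmem | hmem)
    · exact Or.inl hmem
    · exact Or.inr hmem.symm
  · rintro (hmem | hmem)
    · exact Or.inl hmem
    · exact Or.inr hmem.symm

-- B's enumerate-filter equals pvSpec, given the seen-set invariant over the processed prefix.
theorem pv_enum_filter {α β γ : Type} [BEq γ] [LawfulBEq γ] (m : α → Bool) (h : α → β) (g : β → γ) :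
    ∀ (xs full : List α) (k : Nat) (S : PySem.Set γ),
      full.drop k = xs →
      (∀ s : γ, PySem.Set.contains S s
          = (full.take k).any (fun y => m y && (g (h y) == s))) →
      ((pvEnumFrom k xs).filter (fun ix =>
          m ix.2 && !((full.take ix.1).any (fun y => m y && (g (h y) == g (h ix.2)))))).map
          (fun ix => h ix.2)
        = pvSpec m h g xs S := by
  intro xs
  induction xs with
  | nil => intro full k S _ _; rfl
  | cons x t ih =>
    intro full k S hdrop hS
    have hget : full[k]? = some x := by
      rw [← List.head?_drop, hdrop]; rfl
    have htake : full.take (k + 1) = full.take k ++ [x] := by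
      rw [List.take_add_one, hget]; rfl
    have hdrop' : full.drop (k + 1) = t := by
      have h1 : full.drop (k + 1) = (full.drop k).drop 1 := by
        rw [List.drop_drop]
      rw [h1, hdrop]; rfl
    have hcond : (full.take k).any (fun y => m y && (g (h y) == g (h x)))
        = PySem.Set.contains S (g (h x)) := (hS (g (h x))).symm
    simp only [pvEnumFrom, List.filter_cons]
    cases hm : m x
    · simp only [Bool.false_and, Bool.false_eq_true, if_false, pvSpec, hm]
      exact ih full (k + 1) S hdrop' (by
        intro s
        rw [htake, List.any_append, hS s]
        simp only [List.any_cons, List.any_nil, hm, Bool.false_and, Bool.or_false])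
    · cases hc : PySem.Set.contains S (g (h x))
      · -- new matching name: head kept on both sides
        rw [hcond, hc]
        simp only [Bool.not_false, Bool.and_true, if_true, List.map_cons,
          pvSpec, hm, hc, Bool.false_eq_true, if_false]
        refine congrArg (h x :: ·) ?_
        exact ih full (k + 1) (PySem.Set.add S (g (h x))) hdrop' (by
          intro s
          rw [htake, List.any_append, pv_contains_add, hS s]
          simp only [List.any_cons, List.any_nil, hm, Bool.true_and, Bool.or_false])
      · -- duplicate name: head dropped on both sides
        rw [hcond, hc]
        simp only [Bool.not_true, Bool.and_false, Bool.false_eq_true, if_false,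
          pvSpec, hm, hc, if_true]
        exact ih full (k + 1) S hdrop' (by
          intro s
          rw [htake, List.any_append]
          cases hbe : (g (h x) == s)
          · rw [hS s]
            simp only [List.any_cons, List.any_nil, hbe, Bool.and_false, Bool.or_false]
          · have hxs : g (h x) = s := eq_of_beq hbe
            subst hxs
            rw [hcond, hc]
            simp only [List.any_cons, List.any_nil, hm, hbe, Bool.and_true,
              Bool.or_false, Bool.true_or])

-- ===== VERDICT (by name: the statement is the Claim_ definition above) =====
theorem find_category_and_product_only_spec : Claim_equal_find_category_and_product_only := by
  intro user_input products_dict _ _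
  unfold Spec_find_category_and_product_only
  unfold find_category_and_product_only find_category_and_product_only_alt
  dsimp only
  rw [pv_foldl_if_append, List.nil_append, pv_dedup_fold, List.nil_append,
    pv_dedupRec_filter_map]
  unfold pvMatches
  exact (pv_enum_filter
    (fun kv : String × List (String × String) =>
      PySem.Str.isIn kv.1 (PySem.Str.lower user_input)
        || (PySem.Str.split₀ kv.1).any (fun word => PySem.Str.isIn word (PySem.Str.lower user_input))
        || (PySem.Str.split₀ (PySem.Str.lower ((PySem.Dict.mk kv.2).getD "name" ""))).any
             (fun word => PySem.Str.isIn word (PySem.Str.lower user_input)))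
    Prod.snd
    (fun info => (PySem.Dict.mk info).getD "name" "")
    products_dict products_dict 0 PySem.Set.empty rfl (by intro s; rfl)).symm
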